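-- pv_equiv track=rewrite | github.com/GoodAI/torchsim | torchsim/utils/space_engineers_connector.py | list_of_bools_to_bitmap
-- ===== SOURCE A (Python) =====
-- from typing import List
--
-- def list_of_bools_to_bitmap(list: List[bool]) -> int:
--     result = 0
--     mask = 1
--     for val in list:
--         if val:
--             result += mask
--         mask *= 2
--     return result
-- ===== SOURCE B (Python) =====
-- def list_of_bools_to_bitmap(list):
--     result = 0
--     for val in reversed(list):
--         result = result * 2 + (1 if val else 0)
--     return result
-- ===== Notes on version B (the rewrite author's own statement) =====
-- stated objective: simpler
-- what changed: B replaces the forward pass with a separately-tracked doubling mask by a Horner-style fold over the reversed list that shifts a single accumulator (result = result*2 + bit), dropping the mask variable.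
import Mathlib
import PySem

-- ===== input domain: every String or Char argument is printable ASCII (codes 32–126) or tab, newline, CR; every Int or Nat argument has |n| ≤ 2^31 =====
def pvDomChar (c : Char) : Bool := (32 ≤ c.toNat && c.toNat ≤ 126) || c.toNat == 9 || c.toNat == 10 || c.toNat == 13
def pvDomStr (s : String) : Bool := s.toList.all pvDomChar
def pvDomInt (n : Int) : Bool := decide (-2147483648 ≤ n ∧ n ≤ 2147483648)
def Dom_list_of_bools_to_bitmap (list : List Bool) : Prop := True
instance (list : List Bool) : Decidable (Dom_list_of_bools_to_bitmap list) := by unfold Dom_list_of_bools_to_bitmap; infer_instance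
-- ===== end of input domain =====

-- B drops A's separately-tracked doubling mask: a Horner fold over the reversed list (simpler).

-- ===== PORT A =====
-- result = 0; mask = 1; for val in list: if val: result += mask; mask *= 2
def list_of_bools_to_bitmap (list : List Bool) : Int :=
  (list.foldl (fun (st : Int × Int) val =>
    (if val then st.1 + st.2 else st.1, st.2 * 2)) (0, 1)).1

-- ===== PORT B =====
-- result = 0; for val in reversed(list): result = result * 2 + (1 if val else 0)
def list_of_bools_to_bitmap_alt (list : List Bool) : Int :=
  list.reverse.foldl (fun (result : Int) val => result * 2 + (if val then 1 else 0)) 0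

-- ===== PRECONDITION & SPEC =====
def Spec_list_of_bools_to_bitmap (list : List Bool) (out : Int) : Prop := out = list_of_bools_to_bitmap_alt list
instance (list : List Bool) (out : Int) : Decidable (Spec_list_of_bools_to_bitmap list out) := by unfold Spec_list_of_bools_to_bitmap; infer_instance

-- ===== CLAIM (what is proved, stated in full; the proofs are below) =====
def Claim_equal_list_of_bools_to_bitmap : Prop := ∀ (list : List Bool), Dom_list_of_bools_to_bitmap list → Spec_list_of_bools_to_bitmap list (list_of_bools_to_bitmap list)

-- ===== LEMMAS AND PROOFS =====

-- B as a foldr (Horner on the original order).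
theorem alt_eq_foldr (l : List Bool) :
    list_of_bools_to_bitmap_alt l
      = l.foldr (fun val acc => acc * 2 + (if val then 1 else 0)) 0 := by
  unfold list_of_bools_to_bitmap_alt
  rw [List.foldl_reverse]

-- A's loop invariant: starting from (r, m) it returns r + m · Horner(l).
theorem A_loop (l : List Bool) : ∀ (r m : Int),
    (l.foldl (fun (st : Int × Int) val =>
      (if val then st.1 + st.2 else st.1, st.2 * 2)) (r, m)).1
      = r + m * l.foldr (fun val acc => acc * 2 + (if val then 1 else 0)) 0 := by
  induction l with
  | nil => intro r m; simp
  | cons v t ih =>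
      intro r m
      simp only [List.foldl_cons, List.foldr_cons, ih]
      cases v <;> simp <;> ring

-- ===== VERDICT (by name: the statement is the Claim_ definition above) =====
theorem list_of_bools_to_bitmap_spec : Claim_equal_list_of_bools_to_bitmap := by
  intro l _
  show _ = _
  rw [alt_eq_foldr]
  unfold list_of_bools_to_bitmap
  rw [A_loop l 0 1]
  ring
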